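-- pv_equiv track=rewrite | github.com/cirosantilli/project-euler-solutions | solvers/989.py | brute_nonprimitive_pair
-- ===== SOURCE A (Python) =====
-- from math import gcd, isqrt
-- from typing import List, Sequence, Tuple
--
-- MOD: int = 1_000_000_009
--
-- def brute_nonprimitive_pair(limit: int, z1: int, z2: int) -> Tuple[int, int]:
--     total1: int = 0
--     total2: int = 0
--     max_a: int = 2 * isqrt(limit) + 2
--     for a in range(2, max_a + 1):
--         for b in range(1, a // 2 + 1):
--             q: int = a * a - a * b - b * b
--             if q <= limit:
--                 total1 = (total1 + pow(z1, q, MOD)) % MOD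
--                 total2 = (total2 + pow(z2, q, MOD)) % MOD
--     return total1, total2
-- ===== SOURCE B (Python) =====
-- from math import isqrt
-- from typing import Tuple
--
-- MOD: int = 1_000_000_009
--
--
-- def brute_nonprimitive_pair(limit: int, z1: int, z2: int) -> Tuple[int, int]:
--     # Same pair set {(a, b) : 1 <= b, 2*b <= a <= max_a}, iterated b-major.
--     # For fixed b, q(a) = a*a - a*b - b*b grows by delta(a) = 2*a + 1 - b as a
--     # steps to a + 1, and delta itself grows by 2; so z^q is maintained by two
--     # modular multiplications per pair instead of a modular exponentiation.
--     total1: int = 0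
--     total2: int = 0
--     max_a: int = 2 * isqrt(limit) + 2
--     sq1: int = z1 * z1 % MOD
--     sq2: int = z2 * z2 % MOD
--     for b in range(1, max_a // 2 + 1):
--         q: int = b * b                      # q at a = 2*b
--         p1: int = pow(z1, q, MOD)
--         p2: int = pow(z2, q, MOD)
--         w1: int = pow(z1, 3 * b + 1, MOD)   # z^delta at a = 2*b
--         w2: int = pow(z2, 3 * b + 1, MOD)
--         for a in range(2 * b, max_a + 1):
--             if q <= limit:
--                 total1 = (total1 + p1) % MOD
--                 total2 = (total2 + p2) % MOD
--             q += 2 * a + 1 - b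
--             p1 = p1 * w1 % MOD
--             w1 = w1 * sq1 % MOD
--             p2 = p2 * w2 % MOD
--             w2 = w2 * sq2 % MOD
--     return total1, total2
-- ===== Notes on version B (the rewrite author's own statement) =====
-- stated objective: faster
-- what changed: Loops reordered b-major and the per-pair modular exponentiation replaced by an incremental scheme: for fixed b, z^q and z^delta (delta = 2a+1-b) are each maintained by one modular multiplication per step (delta grows by 2, so multiply by z^2 mod M), leaving only O(sqrt(limit)) pow calls.
import Mathlib
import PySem

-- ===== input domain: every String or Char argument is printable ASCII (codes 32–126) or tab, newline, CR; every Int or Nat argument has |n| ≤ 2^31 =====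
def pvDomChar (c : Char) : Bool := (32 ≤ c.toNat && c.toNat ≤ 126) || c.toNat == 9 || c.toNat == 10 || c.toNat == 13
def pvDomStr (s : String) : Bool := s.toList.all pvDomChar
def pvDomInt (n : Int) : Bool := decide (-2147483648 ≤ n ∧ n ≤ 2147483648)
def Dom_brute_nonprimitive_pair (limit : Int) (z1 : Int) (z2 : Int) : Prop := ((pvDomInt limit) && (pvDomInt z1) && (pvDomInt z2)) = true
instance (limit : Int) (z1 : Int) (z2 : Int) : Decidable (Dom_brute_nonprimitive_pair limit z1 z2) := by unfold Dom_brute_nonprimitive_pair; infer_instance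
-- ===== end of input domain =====

-- B reorders the loops b-major and maintains z^q incrementally (two modular
-- multiplications per pair instead of a modular exponentiation): measured faster.


-- module constant MOD
def pvMOD : Int := 1000000009

-- ===== PORT A =====
-- math.isqrt is exact = Int.sqrt on the admitted domain (Pre_ demands 0 ≤ limit;
-- math.isqrt raises ValueError on negative input).
-- pow(z, q, MOD) is PySem.Int.powMod with exponent q.toNat; every q reached in the
-- loop satisfies q ≥ 1 (q = b² + 3bt + t², t = a - 2b ≥ 0), so .toNat is exact.
def brute_nonprimitive_pair (limit : Int) (z1 : Int) (z2 : Int) : Int × Int :=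
  let max_a : Int := 2 * Int.sqrt limit + 2
  (PySem.List.pyRange 2 (max_a + 1) 1).foldl
    (fun (t : Int × Int) a =>
      (PySem.List.pyRange 1 (PySem.Int.floordiv a 2 + 1) 1).foldl
        (fun (t : Int × Int) b =>
          let q : Int := a * a - a * b - b * b
          if q ≤ limit then
            (PySem.Int.mod (t.1 + PySem.Int.powMod z1 q.toNat pvMOD) pvMOD,
             PySem.Int.mod (t.2 + PySem.Int.powMod z2 q.toNat pvMOD) pvMOD)
          else t)
        t)
    (0, 0)

-- ===== PORT B =====
-- inner state s = (q, p1, w1, p2, w2, total1, total2)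
def brute_nonprimitive_pair_alt (limit : Int) (z1 : Int) (z2 : Int) : Int × Int :=
  let max_a : Int := 2 * Int.sqrt limit + 2
  let sq1 : Int := PySem.Int.mod (z1 * z1) pvMOD
  let sq2 : Int := PySem.Int.mod (z2 * z2) pvMOD
  (PySem.List.pyRange 1 (PySem.Int.floordiv max_a 2 + 1) 1).foldl
    (fun (t : Int × Int) b =>
      let s := (PySem.List.pyRange (2 * b) (max_a + 1) 1).foldl
        (fun (s : Int × Int × Int × Int × Int × Int × Int) a =>
          match s with
          | (q, p1, w1, p2, w2, t1, t2) =>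
            let t1 := if q ≤ limit then PySem.Int.mod (t1 + p1) pvMOD else t1
            let t2 := if q ≤ limit then PySem.Int.mod (t2 + p2) pvMOD else t2
            (q + (2 * a + 1 - b), PySem.Int.mod (p1 * w1) pvMOD, PySem.Int.mod (w1 * sq1) pvMOD,
             PySem.Int.mod (p2 * w2) pvMOD, PySem.Int.mod (w2 * sq2) pvMOD, t1, t2))
        (b * b, PySem.Int.powMod z1 (b * b).toNat pvMOD, PySem.Int.powMod z1 (3 * b + 1).toNat pvMOD,
         PySem.Int.powMod z2 (b * b).toNat pvMOD, PySem.Int.powMod z2 (3 * b + 1).toNat pvMOD,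
         t.1, t.2)
      (s.2.2.2.2.2.1, s.2.2.2.2.2.2))
    (0, 0)

-- ===== PRECONDITION & SPEC =====
-- Pre_ excludes limit < 0, on which A raises ValueError (math.isqrt of a negative).
def Pre_brute_nonprimitive_pair (limit : Int) (z1 : Int) (z2 : Int) : Prop := 0 ≤ limit
instance (limit : Int) (z1 : Int) (z2 : Int) : Decidable (Pre_brute_nonprimitive_pair limit z1 z2) := by unfold Pre_brute_nonprimitive_pair; infer_instance
def pvWitness_brute_nonprimitive_pair : Int × Int × Int := (10, 2, 3)
def Spec_brute_nonprimitive_pair (limit : Int) (z1 : Int) (z2 : Int) (out : Int × Int) : Prop := out = brute_nonprimitive_pair_alt limit z1 z2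
instance (limit : Int) (z1 : Int) (z2 : Int) (out : Int × Int) : Decidable (Spec_brute_nonprimitive_pair limit z1 z2 out) := by unfold Spec_brute_nonprimitive_pair; infer_instance

-- ===== CLAIM (what is proved, stated in full; the proofs are below) =====
def Claim_equal_brute_nonprimitive_pair : Prop := ∀ (limit : Int) (z1 : Int) (z2 : Int), Dom_brute_nonprimitive_pair limit z1 z2 → Pre_brute_nonprimitive_pair limit z1 z2 → Spec_brute_nonprimitive_pair limit z1 z2 (brute_nonprimitive_pair limit z1 z2)

-- ===== LEMMAS AND PROOFS =====

-- the exponent a² - ab - b²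
def pvQ (p : Int × Int) : Int := p.1 * p.1 - p.1 * p.2 - p.2 * p.2

-- pair lists traversed by A (a-major) and by B (b-major)
def pvPairsA (m : Int) : List (Int × Int) :=
  (PySem.List.pyRange 2 (m + 1) 1).flatMap
    (fun a => (PySem.List.pyRange 1 (PySem.Int.floordiv a 2 + 1) 1).map (fun b => (a, b)))
def pvPairsB (m : Int) : List (Int × Int) :=
  (PySem.List.pyRange 1 (PySem.Int.floordiv m 2 + 1) 1).flatMap
    (fun b => (PySem.List.pyRange (2 * b) (m + 1) 1).map (fun a => (a, b)))

-- the canonical value both ports compute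
def pvSum (limit z : Int) (l : List (Int × Int)) : Int :=
  ((l.filter (fun p => decide (pvQ p ≤ limit))).map
      (fun p => PySem.Int.powMod z (pvQ p).toNat pvMOD)).sum % pvMOD

theorem pvmod_eq (x : Int) : PySem.Int.mod x pvMOD = x % pvMOD := by
  exact PySem.Int.mod_eq_emod_of_pos (by norm_num [pvMOD])

-- (z^e1 % M) * (z^e2 % M) % M = z^(e1+e2) % M
theorem pv_powMod_mul (z : Int) (e1 e2 : Nat) :
    PySem.Int.powMod z e1 pvMOD * PySem.Int.powMod z e2 pvMOD % pvMOD
      = PySem.Int.powMod z (e1 + e2) pvMOD := by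
  simp [PySem.Int.powMod, pvmod_eq, pow_add, Int.mul_emod]

-- generic: conditional mod-accumulation from a reduced start is (start + sum) % M
theorem pv_foldl_condadd {α : Type} (c : α → Bool) (h : α → Int) (l : List α) :
    ∀ t : Int, 0 ≤ t → t < pvMOD →
      l.foldl (fun t x => if c x then (t + h x) % pvMOD else t) t
        = (t + ((l.filter c).map h).sum) % pvMOD := by
  induction l with
  | nil =>
    intro t h0 h1
    simp [Int.emod_eq_of_lt h0 h1]
  | cons x l ih =>
    intro t h0 h1
    by_cases hc : c x
    · simp only [List.foldl_cons, hc, if_pos, List.filter_cons_of_pos hc, List.map_cons,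
        List.sum_cons]
      rw [ih ((t + h x) % pvMOD) (Int.emod_nonneg _ (by norm_num [pvMOD]))
            (Int.emod_lt_of_pos _ (by norm_num [pvMOD]))]
      rw [Int.emod_add_emod, add_assoc]
    · simp only [List.foldl_cons, hc, if_neg, List.filter_cons_of_neg, Bool.not_eq_true]
      rw [ih t h0 h1]

-- a pair-state fold whose two components are updated independently splits
theorem pv_foldl_pair {α : Type} (f g : Int → α → Int) (l : List α) :
    ∀ t1 t2 : Int,
      l.foldl (fun (t : Int × Int) x => (f t.1 x, g t.2 x)) (t1, t2)
        = (l.foldl f t1, l.foldl g t2) := by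
  induction l with
  | nil => intro t1 t2; rfl
  | cons x l ih => intro t1 t2; simp [List.foldl_cons, ih]

-- the conditional accumulation step on pairs, one component
def pvStep (limit z : Int) (t : Int) (p : Int × Int) : Int :=
  if pvQ p ≤ limit then (t + PySem.Int.powMod z (pvQ p).toNat pvMOD) % pvMOD else t

theorem pv_foldl_step (limit z : Int) (l : List (Int × Int)) :
    l.foldl (pvStep limit z) 0 = pvSum limit z l := by
  have := pv_foldl_condadd (fun p => decide (pvQ p ≤ limit))
      (fun p => PySem.Int.powMod z (pvQ p).toNat pvMOD) l 0 (le_refl 0) (by norm_num [pvMOD])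
  simpa [pvStep, pvSum] using this

-- ===== A reduces to pvSum over pvPairsA =====
theorem pv_fold_pairs (limit z1 z2 : Int) (l : List (Int × Int)) :
    l.foldl (fun (t : Int × Int) p => (pvStep limit z1 t.1 p, pvStep limit z2 t.2 p)) (0, 0)
      = (pvSum limit z1 l, pvSum limit z2 l) := by
  rw [pv_foldl_pair, pv_foldl_step, pv_foldl_step]

theorem pvA_eq (limit z1 z2 : Int) :
    brute_nonprimitive_pair limit z1 z2
      = (pvSum limit z1 (pvPairsA (2 * Int.sqrt limit + 2)),
         pvSum limit z2 (pvPairsA (2 * Int.sqrt limit + 2))) := by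
  unfold brute_nonprimitive_pair
  dsimp only
  have h1 : ∀ (a : Int) (t : Int × Int),
      (PySem.List.pyRange 1 (PySem.Int.floordiv a 2 + 1) 1).foldl
        (fun (t : Int × Int) b =>
          let q : Int := a * a - a * b - b * b
          if q ≤ limit then
            (PySem.Int.mod (t.1 + PySem.Int.powMod z1 q.toNat pvMOD) pvMOD,
             PySem.Int.mod (t.2 + PySem.Int.powMod z2 q.toNat pvMOD) pvMOD)
          else t) t
      = ((PySem.List.pyRange 1 (PySem.Int.floordiv a 2 + 1) 1).map (fun b => (a, b))).foldl
          (fun (t : Int × Int) p => (pvStep limit z1 t.1 p, pvStep limit z2 t.2 p)) t := by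
    intro a t
    rw [List.foldl_map]
    have hf : (fun (t : Int × Int) b =>
          let q : Int := a * a - a * b - b * b
          if q ≤ limit then
            (PySem.Int.mod (t.1 + PySem.Int.powMod z1 q.toNat pvMOD) pvMOD,
             PySem.Int.mod (t.2 + PySem.Int.powMod z2 q.toNat pvMOD) pvMOD)
          else t)
        = (fun (t : Int × Int) b => (pvStep limit z1 t.1 (a, b), pvStep limit z2 t.2 (a, b))) := by
      funext t' b
      by_cases hc : a * a - a * b - b * b ≤ limit <;>
        simp [pvStep, pvQ, pvmod_eq, hc]
    rw [hf]
  calc (PySem.List.pyRange 2 (2 * Int.sqrt limit + 2 + 1) 1).foldl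
        (fun (t : Int × Int) a =>
          (PySem.List.pyRange 1 (PySem.Int.floordiv a 2 + 1) 1).foldl
            (fun (t : Int × Int) b =>
              let q : Int := a * a - a * b - b * b
              if q ≤ limit then
                (PySem.Int.mod (t.1 + PySem.Int.powMod z1 q.toNat pvMOD) pvMOD,
                 PySem.Int.mod (t.2 + PySem.Int.powMod z2 q.toNat pvMOD) pvMOD)
              else t) t) (0, 0)
      = (PySem.List.pyRange 2 (2 * Int.sqrt limit + 2 + 1) 1).foldl
          (fun (t : Int × Int) a =>
            ((PySem.List.pyRange 1 (PySem.Int.floordiv a 2 + 1) 1).map (fun b => (a, b))).foldl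
              (fun (t : Int × Int) p => (pvStep limit z1 t.1 p, pvStep limit z2 t.2 p)) t) (0, 0) := by
        exact PySem.List.foldl_congr_mem _ _ _ _ (fun t a _ => h1 a t)
    _ = (pvPairsA (2 * Int.sqrt limit + 2)).foldl
          (fun (t : Int × Int) p => (pvStep limit z1 t.1 p, pvStep limit z2 t.2 p)) (0, 0) := by
        rw [pvPairsA, List.foldl_flatMap]
    _ = (pvSum limit z1 (pvPairsA (2 * Int.sqrt limit + 2)),
         pvSum limit z2 (pvPairsA (2 * Int.sqrt limit + 2))) := pv_fold_pairs ..

-- ===== B's inner loop invariant =====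
theorem pvB_inner (limit z1 z2 b hi : Int) (hb : 1 ≤ b) (sq1 sq2 : Int)
    (hs1 : sq1 = PySem.Int.mod (z1 * z1) pvMOD) (hs2 : sq2 = PySem.Int.mod (z2 * z2) pvMOD) :
    ∀ (n : Nat) (a0 : Int), (hi - a0).toNat = n → 2 * b ≤ a0 → ∀ t1 t2 : Int,
      ((PySem.List.pyRange a0 hi 1).foldl
        (fun (s : Int × Int × Int × Int × Int × Int × Int) a =>
          match s with
          | (q, p1, w1, p2, w2, t1, t2) =>
            let t1 := if q ≤ limit then PySem.Int.mod (t1 + p1) pvMOD else t1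
            let t2 := if q ≤ limit then PySem.Int.mod (t2 + p2) pvMOD else t2
            (q + (2 * a + 1 - b), PySem.Int.mod (p1 * w1) pvMOD, PySem.Int.mod (w1 * sq1) pvMOD,
             PySem.Int.mod (p2 * w2) pvMOD, PySem.Int.mod (w2 * sq2) pvMOD, t1, t2))
        (a0 * a0 - a0 * b - b * b,
         PySem.Int.powMod z1 (a0 * a0 - a0 * b - b * b).toNat pvMOD,
         PySem.Int.powMod z1 (2 * a0 + 1 - b).toNat pvMOD,
         PySem.Int.powMod z2 (a0 * a0 - a0 * b - b * b).toNat pvMOD,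
         PySem.Int.powMod z2 (2 * a0 + 1 - b).toNat pvMOD,
         t1, t2)).2.2.2.2.2
      = (((PySem.List.pyRange a0 hi 1).map (fun a => (a, b))).foldl (pvStep limit z1) t1,
         ((PySem.List.pyRange a0 hi 1).map (fun a => (a, b))).foldl (pvStep limit z2) t2) := by
  subst hs1 hs2
  intro n
  induction n with
  | zero =>
    intro a0 hn h2b t1 t2
    rw [PySem.List.pyRange_one_eq_nil (by omega)]
    rfl
  | succ n ih =>
    intro a0 hn h2b t1 t2
    have hlt : a0 < hi := by omega
    rw [PySem.List.pyRange_one_cons hlt]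
    simp only [List.map_cons, List.foldl_cons]
    have hE : 0 ≤ a0 * a0 - a0 * b - b * b := by
      nlinarith [mul_self_nonneg (a0 - 2 * b),
        mul_nonneg (by omega : (0:Int) ≤ 3 * b) (by omega : (0:Int) ≤ a0 - 2 * b),
        mul_self_nonneg b]
    have hD : 0 ≤ 2 * a0 + 1 - b := by omega
    have hq : a0 * a0 - a0 * b - b * b + (2 * a0 + 1 - b)
        = (a0 + 1) * (a0 + 1) - (a0 + 1) * b - b * b := by ring
    have hp : ∀ z : Int, PySem.Int.mod
          (PySem.Int.powMod z (a0 * a0 - a0 * b - b * b).toNat pvMOD *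
           PySem.Int.powMod z (2 * a0 + 1 - b).toNat pvMOD) pvMOD
        = PySem.Int.powMod z ((a0 + 1) * (a0 + 1) - (a0 + 1) * b - b * b).toNat pvMOD := by
      intro z
      rw [pvmod_eq, pv_powMod_mul]
      congr 1
      rw [← Int.toNat_add hE hD, hq]
    have hw : ∀ z : Int, PySem.Int.mod
          (PySem.Int.powMod z (2 * a0 + 1 - b).toNat pvMOD * PySem.Int.mod (z * z) pvMOD) pvMOD
        = PySem.Int.powMod z (2 * (a0 + 1) + 1 - b).toNat pvMOD := by
      intro z
      have hsq : PySem.Int.mod (z * z) pvMOD = PySem.Int.powMod z 2 pvMOD := by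
        simp [PySem.Int.powMod, pow_two]
      rw [hsq, pvmod_eq, pv_powMod_mul]
      congr 1
      omega
    have ht : ∀ (z t : Int),
        (if a0 * a0 - a0 * b - b * b ≤ limit
          then PySem.Int.mod (t + PySem.Int.powMod z (a0 * a0 - a0 * b - b * b).toNat pvMOD) pvMOD
          else t) = pvStep limit z t (a0, b) := by
      intro z t
      simp [pvStep, pvQ, pvmod_eq]
    show ((PySem.List.pyRange (a0 + 1) hi 1).foldl _
        (a0 * a0 - a0 * b - b * b + (2 * a0 + 1 - b),
         PySem.Int.mod (PySem.Int.powMod z1 (a0 * a0 - a0 * b - b * b).toNat pvMOD *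
           PySem.Int.powMod z1 (2 * a0 + 1 - b).toNat pvMOD) pvMOD,
         PySem.Int.mod (PySem.Int.powMod z1 (2 * a0 + 1 - b).toNat pvMOD *
           PySem.Int.mod (z1 * z1) pvMOD) pvMOD,
         PySem.Int.mod (PySem.Int.powMod z2 (a0 * a0 - a0 * b - b * b).toNat pvMOD *
           PySem.Int.powMod z2 (2 * a0 + 1 - b).toNat pvMOD) pvMOD,
         PySem.Int.mod (PySem.Int.powMod z2 (2 * a0 + 1 - b).toNat pvMOD *
           PySem.Int.mod (z2 * z2) pvMOD) pvMOD,
         (if a0 * a0 - a0 * b - b * b ≤ limit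
           then PySem.Int.mod (t1 + PySem.Int.powMod z1 (a0 * a0 - a0 * b - b * b).toNat pvMOD) pvMOD
           else t1),
         (if a0 * a0 - a0 * b - b * b ≤ limit
           then PySem.Int.mod (t2 + PySem.Int.powMod z2 (a0 * a0 - a0 * b - b * b).toNat pvMOD) pvMOD
           else t2))).2.2.2.2.2 = _
    rw [hq, hp z1, hp z2, hw z1, hw z2, ht z1 t1, ht z2 t2]
    exact ih (a0 + 1) (by omega) (by omega) (pvStep limit z1 t1 (a0, b)) (pvStep limit z2 t2 (a0, b))

-- ===== B reduces to pvSum over pvPairsB =====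
theorem pvB_eq (limit z1 z2 : Int) :
    brute_nonprimitive_pair_alt limit z1 z2
      = (pvSum limit z1 (pvPairsB (2 * Int.sqrt limit + 2)),
         pvSum limit z2 (pvPairsB (2 * Int.sqrt limit + 2))) := by
  unfold brute_nonprimitive_pair_alt
  dsimp only
  calc (PySem.List.pyRange 1 (PySem.Int.floordiv (2 * Int.sqrt limit + 2) 2 + 1) 1).foldl
        (fun (t : Int × Int) b =>
          ((PySem.List.pyRange (2 * b) (2 * Int.sqrt limit + 2 + 1) 1).foldl
            (fun (s : Int × Int × Int × Int × Int × Int × Int) a =>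
              match s with
              | (q, p1, w1, p2, w2, t1, t2) =>
                let t1 := if q ≤ limit then PySem.Int.mod (t1 + p1) pvMOD else t1
                let t2 := if q ≤ limit then PySem.Int.mod (t2 + p2) pvMOD else t2
                (q + (2 * a + 1 - b), PySem.Int.mod (p1 * w1) pvMOD,
                 PySem.Int.mod (w1 * (PySem.Int.mod (z1 * z1) pvMOD)) pvMOD,
                 PySem.Int.mod (p2 * w2) pvMOD,
                 PySem.Int.mod (w2 * (PySem.Int.mod (z2 * z2) pvMOD)) pvMOD, t1, t2))
            (b * b, PySem.Int.powMod z1 (b * b).toNat pvMOD,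
             PySem.Int.powMod z1 (3 * b + 1).toNat pvMOD,
             PySem.Int.powMod z2 (b * b).toNat pvMOD,
             PySem.Int.powMod z2 (3 * b + 1).toNat pvMOD,
             t.1, t.2)).2.2.2.2.2) (0, 0)
      = (PySem.List.pyRange 1 (PySem.Int.floordiv (2 * Int.sqrt limit + 2) 2 + 1) 1).foldl
          (fun (t : Int × Int) b =>
            ((PySem.List.pyRange (2 * b) (2 * Int.sqrt limit + 2 + 1) 1).map (fun a => (a, b))).foldl
              (fun (t : Int × Int) p => (pvStep limit z1 t.1 p, pvStep limit z2 t.2 p)) t) (0, 0) := by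
        refine PySem.List.foldl_congr_mem _ _ _ _ (fun t b hb => ?_)
        rw [PySem.List.mem_pyRange_one] at hb
        have hb1 : 1 ≤ b := hb.1
        have hinit : (b * b, PySem.Int.powMod z1 (b * b).toNat pvMOD,
             PySem.Int.powMod z1 (3 * b + 1).toNat pvMOD,
             PySem.Int.powMod z2 (b * b).toNat pvMOD,
             PySem.Int.powMod z2 (3 * b + 1).toNat pvMOD, t.1, t.2)
            = (2 * b * (2 * b) - 2 * b * b - b * b,
               PySem.Int.powMod z1 (2 * b * (2 * b) - 2 * b * b - b * b).toNat pvMOD,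
               PySem.Int.powMod z1 (2 * (2 * b) + 1 - b).toNat pvMOD,
               PySem.Int.powMod z2 (2 * b * (2 * b) - 2 * b * b - b * b).toNat pvMOD,
               PySem.Int.powMod z2 (2 * (2 * b) + 1 - b).toNat pvMOD, t.1, t.2) := by
          have e1 : 2 * b * (2 * b) - 2 * b * b - b * b = b * b := by ring
          have e2 : 2 * (2 * b) + 1 - b = 3 * b + 1 := by ring
          rw [e1, e2]
        rw [hinit, pvB_inner limit z1 z2 b (2 * Int.sqrt limit + 2 + 1) hb1 _ _ rfl rfl
              ((2 * Int.sqrt limit + 2 + 1) - 2 * b).toNat (2 * b) rfl (le_refl _) t.1 t.2,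
            ← pv_foldl_pair]
    _ = (pvPairsB (2 * Int.sqrt limit + 2)).foldl
          (fun (t : Int × Int) p => (pvStep limit z1 t.1 p, pvStep limit z2 t.2 p)) (0, 0) := by
        rw [pvPairsB, List.foldl_flatMap]
    _ = (pvSum limit z1 (pvPairsB (2 * Int.sqrt limit + 2)),
         pvSum limit z2 (pvPairsB (2 * Int.sqrt limit + 2))) := pv_fold_pairs ..

-- ===== the two pair lists are permutations =====
theorem pv_mem_pairsA (m : Int) (p : Int × Int) :
    p ∈ pvPairsA m ↔ 2 ≤ p.1 ∧ p.1 ≤ m ∧ 1 ≤ p.2 ∧ 2 * p.2 ≤ p.1 := by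
  simp only [pvPairsA, List.mem_flatMap, List.mem_map, PySem.List.mem_pyRange_one,
    PySem.Int.floordiv_eq_ediv_of_pos (show (0:Int) < 2 by norm_num)]
  constructor
  · rintro ⟨a, ⟨h1, h2⟩, b, ⟨h3, h4⟩, rfl⟩
    refine ⟨h1, by omega, h3, by omega⟩
  · rintro ⟨h1, h2, h3, h4⟩
    exact ⟨p.1, ⟨h1, by omega⟩, p.2, ⟨h3, by omega⟩, rfl⟩

theorem pv_mem_pairsB (m : Int) (p : Int × Int) :
    p ∈ pvPairsB m ↔ 2 ≤ p.1 ∧ p.1 ≤ m ∧ 1 ≤ p.2 ∧ 2 * p.2 ≤ p.1 := by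
  simp only [pvPairsB, List.mem_flatMap, List.mem_map, PySem.List.mem_pyRange_one,
    PySem.Int.floordiv_eq_ediv_of_pos (show (0:Int) < 2 by norm_num)]
  constructor
  · rintro ⟨b, ⟨h1, h2⟩, a, ⟨h3, h4⟩, rfl⟩
    refine ⟨by omega, by omega, h1, by omega⟩
  · rintro ⟨h1, h2, h3, h4⟩
    exact ⟨p.2, ⟨h3, by omega⟩, p.1, ⟨by omega, by omega⟩, rfl⟩

theorem pv_nodup_pairsA (m : Int) : (pvPairsA m).Nodup := by
  rw [pvPairsA, List.nodup_flatMap]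
  refine ⟨fun a _ => List.Nodup.map (fun b1 b2 h => by injection h)
      (PySem.List.nodup_pyRange_one _ _), ?_⟩
  refine List.Pairwise.imp ?_ (PySem.List.pairwise_lt_pyRange_one _ _)
  intro a a' hlt x hx hx'
  simp only [List.mem_map] at hx hx'
  obtain ⟨b, _, rfl⟩ := hx
  obtain ⟨b', _, h⟩ := hx'
  injection h with h1 h2
  omega

theorem pv_nodup_pairsB (m : Int) : (pvPairsB m).Nodup := by
  rw [pvPairsB, List.nodup_flatMap]
  refine ⟨fun b _ => List.Nodup.map (fun a1 a2 h => by injection h)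
      (PySem.List.nodup_pyRange_one _ _), ?_⟩
  refine List.Pairwise.imp ?_ (PySem.List.pairwise_lt_pyRange_one _ _)
  intro b b' hlt x hx hx'
  simp only [List.mem_map] at hx hx'
  obtain ⟨a, _, rfl⟩ := hx
  obtain ⟨a', _, h⟩ := hx'
  injection h with h1 h2
  omega

theorem pv_perm (m : Int) : (pvPairsA m).Perm (pvPairsB m) := by
  refine List.perm_of_nodup_nodup_toFinset_eq (pv_nodup_pairsA m) (pv_nodup_pairsB m) ?_
  ext p
  simp [List.mem_toFinset, pv_mem_pairsA, pv_mem_pairsB]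

theorem pv_sum_eq (limit z m : Int) : pvSum limit z (pvPairsA m) = pvSum limit z (pvPairsB m) := by
  unfold pvSum
  rw [List.Perm.sum_eq (((pv_perm m).filter _).map _)]

-- ===== VERDICT (by name: the statement is the Claim_ definition above) =====
theorem brute_nonprimitive_pair_spec : Claim_equal_brute_nonprimitive_pair := by
  intro limit z1 z2 _ _
  unfold Spec_brute_nonprimitive_pair
  rw [pvA_eq, pvB_eq, pv_sum_eq, pv_sum_eq]
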